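-- pv_equiv track=rewrite | github.com/krathus88/LOA-Moon | backend/homepage/services.py | sort_players_in_chunks
-- ===== SOURCE A (Python) =====
-- def sort_players_in_chunks(player_data):
--     # Create a dictionary to group players by party_num
--     grouped_players = {}
--
--     for player in player_data:
--         party_num = player["party_num"]
--         if party_num not in grouped_players:
--             grouped_players[party_num] = []
--         grouped_players[party_num].append(player)
--
--     # Sort players within each party by damage_percentage
--     sorted_players = []
--     for party_num in sorted(grouped_players.keys()):
--         sorted_party = sorted(
--             grouped_players[party_num],
--             key=lambda p: p["damage_percentage"],
--             reverse=True,
--         )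
--         sorted_players.extend(sorted_party)
--
--     return sorted_players
-- ===== SOURCE B (Python) =====
-- def sort_players_in_chunks(player_data):
--     # Two stable sorts: damage descending first, then party ascending.
--     # Stability keeps each party's players in damage-descending order,
--     # so no grouping dictionary is needed.
--     by_damage = sorted(player_data, key=lambda p: p["damage_percentage"], reverse=True)
--     return sorted(by_damage, key=lambda p: p["party_num"])
-- ===== Notes on version B (the rewrite author's own statement) =====
-- stated objective: simpler
-- what changed: Replaces the party-grouping dictionary plus per-party sorts and sorted-key iteration with two whole-list stable sorts (damage descending, then party ascending); stability reproduces A's grouping and tie order.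
import Mathlib
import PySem

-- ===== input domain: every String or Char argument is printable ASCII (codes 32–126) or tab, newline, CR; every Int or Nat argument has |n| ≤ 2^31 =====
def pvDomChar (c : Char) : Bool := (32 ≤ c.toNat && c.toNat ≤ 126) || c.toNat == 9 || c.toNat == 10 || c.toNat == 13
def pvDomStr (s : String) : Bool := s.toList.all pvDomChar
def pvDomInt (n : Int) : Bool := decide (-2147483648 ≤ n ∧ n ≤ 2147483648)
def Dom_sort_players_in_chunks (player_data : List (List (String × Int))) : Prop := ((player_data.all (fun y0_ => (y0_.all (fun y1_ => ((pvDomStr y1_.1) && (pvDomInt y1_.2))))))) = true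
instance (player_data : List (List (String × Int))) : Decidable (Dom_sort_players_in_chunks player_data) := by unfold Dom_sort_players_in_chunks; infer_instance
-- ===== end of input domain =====

-- B replaces A's party-grouping dictionary and per-party sorts by two whole-list stable sorts
-- (damage descending, then party ascending) — a simpler decomposition with the same result.


-- ===== PORT A =====
-- Python dict access d[k]: exact for association lists with distinct keys that contain k (Pre_).
def pvLookup (p : List (String × Int)) (k : String) : Int :=
  (((p.find? (fun kv => kv.1 == k)).map (fun kv => kv.2)).getD 0)

def sort_players_in_chunks (player_data : List (List (String × Int))) : List (List (String × Int)) :=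
  -- for player in player_data: group by player["party_num"]
  let grouped : PySem.Dict Int (List (List (String × Int))) :=
    player_data.foldl (fun g player =>
      let party_num := pvLookup player "party_num"
      -- if party_num not in grouped_players: grouped_players[party_num] = []
      let g := if g.contains party_num then g else g.insert party_num []
      -- grouped_players[party_num].append(player)
      g.insert party_num (g.getD party_num [] ++ [player])) PySem.Dict.empty
  -- for party_num in sorted(grouped_players.keys()): extend with the party sorted by damage desc
  (PySem.List.sorted grouped.keys (fun k => k) false).foldl
    (fun sorted_players party_num =>
      sorted_players ++
        PySem.List.sorted (grouped.getD party_num [])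
          (fun p => pvLookup p "damage_percentage") true)
    []

-- ===== PORT B =====
def sort_players_in_chunks_alt (player_data : List (List (String × Int))) : List (List (String × Int)) :=
  let by_damage := PySem.List.sorted player_data (fun p => pvLookup p "damage_percentage") true
  PySem.List.sorted by_damage (fun p => pvLookup p "party_num") false

-- ===== PRECONDITION & SPEC =====
-- Pre_ excludes players missing either required key (Python raises KeyError there) and players whose
-- association list carries duplicate keys, on which Python's dict constructor collapses to the last
-- value while first-match association-list lookup is equally defensible.
def Pre_sort_players_in_chunks (player_data : List (List (String × Int))) : Prop :=
  ∀ p ∈ player_data, (p.map Prod.fst).Nodup ∧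
    "party_num" ∈ p.map Prod.fst ∧ "damage_percentage" ∈ p.map Prod.fst
instance (player_data : List (List (String × Int))) : Decidable (Pre_sort_players_in_chunks player_data) := by unfold Pre_sort_players_in_chunks; infer_instance
def pvWitness_sort_players_in_chunks : (List (List (String × Int))) :=
  [[("party_num", 2), ("damage_percentage", 10)],
   [("party_num", 1), ("damage_percentage", 50)],
   [("party_num", 1), ("damage_percentage", 70)]]
def Spec_sort_players_in_chunks (player_data : List (List (String × Int))) (out : List (List (String × Int))) : Prop := out = sort_players_in_chunks_alt player_data
instance (player_data : List (List (String × Int))) (out : List (List (String × Int))) : Decidable (Spec_sort_players_in_chunks player_data out) := by unfold Spec_sort_players_in_chunks; infer_instance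

-- ===== CLAIM (what is proved, stated in full; the proofs are below) =====
def Claim_equal_sort_players_in_chunks : Prop := ∀ (player_data : List (List (String × Int))), Dom_sort_players_in_chunks player_data → Pre_sort_players_in_chunks player_data → Spec_sort_players_in_chunks player_data (sort_players_in_chunks player_data)

-- ===== LEMMAS AND PROOFS =====

theorem pv_insertBy_all {α : Type} (c : α → α → Bool) (x : α) (t : List α)
    (h : ∀ z ∈ t, c x z = true) : PySem.List.insertBy c x t = x :: t := by
  cases t with
  | nil => rfl
  | cons y ys => simp [PySem.List.insertBy, h y (by simp)]

theorem pv_insertBy_skip {α : Type} (c : α → α → Bool) (x : α) (t₁ t₂ : List α)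
    (h : ∀ z ∈ t₁, c x z = false) :
    PySem.List.insertBy c x (t₁ ++ t₂) = t₁ ++ PySem.List.insertBy c x t₂ := by
  induction t₁ with
  | nil => rfl
  | cons y ys ih =>
      have hy : c x y = false := h y (by simp)
      simp only [List.cons_append, PySem.List.insertBy, hy, Bool.false_eq_true, if_false]
      rw [ih (fun z hz => h z (List.mem_cons_of_mem _ hz))]

theorem pv_filter_insertBy_neg {α : Type} (c : α → α → Bool) (p : α → Bool) (x : α) (t : List α)
    (hx : p x = false) : (PySem.List.insertBy c x t).filter p = t.filter p := by
  induction t with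
  | nil => simp [PySem.List.insertBy, hx]
  | cons y ys ih =>
      by_cases hc : c x y = true
      · simp [PySem.List.insertBy, hc, hx]
      · simp only [PySem.List.insertBy, hc, Bool.false_eq_true, if_false]
        simp [List.filter_cons, ih]

theorem pv_filter_insertBy_pos {α : Type} (c : α → α → Bool) (p : α → Bool) (x : α) (t : List α)
    (hx : p x = true) (hpw : t.Pairwise (fun a b => c x a = true → c x b = true)) :
    (PySem.List.insertBy c x t).filter p = PySem.List.insertBy c x (t.filter p) := by
  induction t with
  | nil => simp [PySem.List.insertBy, hx]
  | cons y ys ih =>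
      rcases List.pairwise_cons.mp hpw with ⟨hy, hys⟩
      by_cases hc : c x y = true
      · have h1 : PySem.List.insertBy c x (y :: ys) = x :: y :: ys := by
          simp [PySem.List.insertBy, hc]
        have hall : ∀ z ∈ (y :: ys).filter p, c x z = true := by
          intro z hz
          have hz' := List.mem_of_mem_filter hz
          rcases List.mem_cons.mp hz' with h | h
          · subst h; exact hc
          · exact hy z h hc
        rw [h1, pv_insertBy_all c x _ hall, List.filter_cons_of_pos hx]
      · have h1 : PySem.List.insertBy c x (y :: ys) = y :: PySem.List.insertBy c x ys := by
          simp [PySem.List.insertBy, hc]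
        rw [h1]
        by_cases hp : p y = true
        · rw [List.filter_cons_of_pos hp, List.filter_cons_of_pos hp, ih hys]
          have h2 : PySem.List.insertBy c x (y :: ys.filter p) =
              y :: PySem.List.insertBy c x (ys.filter p) := by
            simp [PySem.List.insertBy, hc]
          rw [h2]
        · rw [List.filter_cons_of_neg (by simpa using hp),
              List.filter_cons_of_neg (by simpa using hp), ih hys]

theorem pv_sorted_append_false {α κ : Type} [LinearOrder κ] (l : List α) (x : α) (key : α → κ) :
    PySem.List.sorted (l ++ [x]) key false =
      PySem.List.insertBy (fun a b => decide (key a < key b)) x (PySem.List.sorted l key false) := by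
  simp [PySem.List.sorted, List.foldl_append]

theorem pv_sorted_append_true {α κ : Type} [LinearOrder κ] (l : List α) (x : α) (key : α → κ) :
    PySem.List.sorted (l ++ [x]) key true =
      PySem.List.insertBy (fun a b => decide (key b < key a)) x (PySem.List.sorted l key true) := by
  simp [PySem.List.sorted, List.foldl_append]

theorem pv_filter_sorted {α κ : Type} [LinearOrder κ] (key : α → κ) (p : α → Bool) (rev : Bool)
    (l : List α) :
    (PySem.List.sorted l key rev).filter p = PySem.List.sorted (l.filter p) key rev := by
  induction l using List.reverseRecOn with
  | nil => simp [PySem.List.sorted]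
  | append_singleton m x ih =>
      rw [List.filter_append]
      cases rev
      · have hpw : (PySem.List.sorted m key false).Pairwise
            (fun a b => (fun a b => decide (key a < key b)) x a = true →
              (fun a b => decide (key a < key b)) x b = true) := by
          refine (PySem.List.sorted_pairwise m key).imp ?_
          intro a b hab hxa
          simp only [decide_eq_true_eq] at *
          exact lt_of_lt_of_le hxa hab
        rw [pv_sorted_append_false]
        by_cases hp : p x = true
        · rw [pv_filter_insertBy_pos _ _ _ _ hp hpw, ih,
              List.filter_cons_of_pos hp, List.filter_nil, pv_sorted_append_false]
        · rw [pv_filter_insertBy_neg _ _ _ _ (by simpa using hp), ih,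
              List.filter_cons_of_neg (by simpa using hp), List.filter_nil, List.append_nil]
      · have hpw : (PySem.List.sorted m key true).Pairwise
            (fun a b => (fun a b => decide (key b < key a)) x a = true →
              (fun a b => decide (key b < key a)) x b = true) := by
          refine (PySem.List.sorted_pairwise_rev m key).imp ?_
          intro a b hab hxa
          simp only [decide_eq_true_eq] at *
          exact lt_of_le_of_lt hab hxa
        rw [pv_sorted_append_true]
        by_cases hp : p x = true
        · rw [pv_filter_insertBy_pos _ _ _ _ hp hpw, ih,
              List.filter_cons_of_pos hp, List.filter_nil, pv_sorted_append_true]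
        · rw [pv_filter_insertBy_neg _ _ _ _ (by simpa using hp), ih,
              List.filter_cons_of_neg (by simpa using hp), List.filter_nil, List.append_nil]

def pvInsKey (v : Int) : List Int → List Int
  | [] => [v]
  | k :: K => if v < k then v :: k :: K else if v = k then k :: K else k :: pvInsKey v K

theorem pv_insKey_of_mem (v : Int) (K : List Int) (hK : K.Pairwise (· < ·)) (hv : v ∈ K) :
    pvInsKey v K = K := by
  induction K with
  | nil => cases hv
  | cons k K ih =>
      rcases List.pairwise_cons.mp hK with ⟨hk, hK'⟩
      rcases List.mem_cons.mp hv with h | h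
      · subst h; simp [pvInsKey]
      · have h1 : ¬ v < k := not_lt_of_gt (hk v h)
        have h2 : ¬ v = k := by rintro rfl; exact h1 (hk v h)
        simp [pvInsKey, h1, h2, ih hK' h]

theorem pv_insKey_eq_insertBy (v : Int) (K : List Int) (hv : v ∉ K) :
    pvInsKey v K = PySem.List.insertBy (fun a b => decide (a < b)) v K := by
  induction K with
  | nil => rfl
  | cons k K ih =>
      by_cases h1 : v < k
      · simp [pvInsKey, PySem.List.insertBy, h1]
      · have h2 : ¬ v = k := by rintro rfl; exact hv (by simp)
        simp [pvInsKey, PySem.List.insertBy, h1, h2,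
          ih (fun h => hv (List.mem_cons_of_mem _ h))]

theorem pv_insert_groups {α : Type} (key : α → Int) (x : α) (K : List Int) (g : Int → List α)
    (hK : K.Pairwise (· < ·))
    (hg : ∀ k ∈ K, ∀ y ∈ g k, key y = k)
    (hcov : key x ∉ K → g (key x) = []) :
    PySem.List.insertBy (fun a b => decide (key a < key b)) x (K.flatMap g) =
      (pvInsKey (key x) K).flatMap (fun k => g k ++ if k = key x then [x] else []) := by
  induction K generalizing g with
  | nil =>
      simp [pvInsKey, PySem.List.insertBy, hcov (by simp)]
  | cons k K ih =>
      rcases List.pairwise_cons.mp hK with ⟨hk, hK'⟩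
      rcases lt_trichotomy (key x) k with hlt | heq | hgt
      · -- x's key goes strictly in front of everything
        have hxnot : key x ∉ k :: K := by
          intro h
          rcases List.mem_cons.mp h with h | h
          · exact absurd h (ne_of_lt hlt)
          · have := hk _ h; omega
        have hall : ∀ z ∈ (k :: K).flatMap g, decide (key x < key z) = true := by
          intro z hz
          rcases List.mem_flatMap.mp hz with ⟨k', hk', hzk'⟩
          have hz' : key z = k' := hg k' hk' z hzk'
          rcases List.mem_cons.mp hk' with h | h
          · subst h; simpa [hz'] using hlt
          · have := hk _ h
            simp only [decide_eq_true_eq, hz']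
            exact lt_trans hlt this
        rw [pv_insertBy_all _ _ _ hall]
        have h1 : pvInsKey (key x) (k :: K) = key x :: k :: K := by simp [pvInsKey, hlt]
        rw [h1]
        have h2 : ∀ k' ∈ k :: K, (g k' ++ if k' = key x then [x] else []) = g k' := by
          intro k' hk'
          have : k' ≠ key x := fun h => hxnot (h ▸ hk')
          simp [this]
        have h4 : List.flatMap (fun k' => g k' ++ if k' = key x then [x] else [])
              (key x :: k :: K) = (g (key x) ++ [x]) ++ List.flatMap g (k :: K) := by
          rw [List.flatMap_cons, List.flatMap_congr h2]
          simp
        rw [h4, hcov hxnot]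
        simp
      · -- key x = k : x appended right after group k
        subst heq
        have hskip : ∀ z ∈ g (key x), (fun a b => decide (key a < key b)) x z = false := by
          intro z hz
          have : key z = key x := hg (key x) (by simp) z hz
          simp [this]
        have hall : ∀ z ∈ K.flatMap g, decide (key x < key z) = true := by
          intro z hz
          rcases List.mem_flatMap.mp hz with ⟨k', hk', hzk'⟩
          have hz' : key z = k' := hg k' (List.mem_cons_of_mem _ hk') z hzk'
          simp only [decide_eq_true_eq, hz']
          exact hk _ hk'
        rw [List.flatMap_cons, pv_insertBy_skip _ _ _ _ hskip, pv_insertBy_all _ _ _ hall]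
        have h1 : pvInsKey (key x) (key x :: K) = key x :: K := by simp [pvInsKey]
        rw [h1, List.flatMap_cons]
        have h2 : ∀ k' ∈ K, (g k' ++ if k' = key x then [x] else []) = g k' := by
          intro k' hk'
          have : k' ≠ key x := ne_of_gt (hk _ hk')
          simp [this]
        rw [List.flatMap_congr h2]
        simp
      · -- k < key x : skip group k, recurse
        have hskip : ∀ z ∈ g k, (fun a b => decide (key a < key b)) x z = false := by
          intro z hz
          have : key z = k := hg k (by simp) z hz
          simp only [this, decide_eq_false_iff_not]
          exact not_lt_of_gt hgt
        have h1 : pvInsKey (key x) (k :: K) = k :: pvInsKey (key x) K := by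
          simp [pvInsKey, not_lt_of_gt hgt, (ne_of_gt hgt : key x ≠ k)]
        rw [List.flatMap_cons, pv_insertBy_skip _ _ _ _ hskip, h1, List.flatMap_cons]
        have hne : k ≠ key x := ne_of_lt hgt
        rw [ih g hK' (fun k' hk' => hg k' (List.mem_cons_of_mem _ hk'))
            (fun h => hcov (fun h' => by
              rcases List.mem_cons.mp h' with h'' | h''
              · exact hne h''.symm
              · exact h h''))]
        simp [hne]

theorem pv_sorted_eq_flatMap_groups {α : Type} (key : α → Int) (m : List α) :
    PySem.List.sorted m key false =
      (PySem.List.sorted (PySem.Set.ofList (m.map key)) (fun k => k) false).flatMap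
        (fun k => m.filter (fun y => key y == k)) := by
  induction m using List.reverseRecOn with
  | nil => simp [PySem.List.sorted, PySem.Set.ofList, PySem.Set.empty]
  | append_singleton m x ih =>
      have hK : (PySem.List.sorted (PySem.Set.ofList (m.map key)) (fun k => k) false).Pairwise
          (· < ·) := PySem.List.sorted_ofList_pairwise_lt (m.map key)
      have hg : ∀ k ∈ PySem.List.sorted (PySem.Set.ofList (m.map key)) (fun k => k) false,
          ∀ y ∈ m.filter (fun y => key y == k), key y = k := by
        intro k _ y hy
        have := List.of_mem_filter hy
        simpa using this
      have hcov : key x ∉ PySem.List.sorted (PySem.Set.ofList (m.map key)) (fun k => k) false →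
          m.filter (fun y => key y == key x) = [] := by
        intro h
        rw [PySem.List.mem_sorted, PySem.Set.mem_ofList] at h
        refine List.filter_eq_nil_iff.mpr ?_
        intro y hy
        simp only [beq_iff_eq]
        intro hyx
        exact h (hyx ▸ List.mem_map_of_mem hy)
      rw [pv_sorted_append_false, ih,
        pv_insert_groups key x _ _ hK hg hcov]
      -- now identify the key lists and the groups
      have hofl : PySem.Set.ofList ((m ++ [x]).map key) =
          PySem.Set.add (PySem.Set.ofList (m.map key)) (key x) := by
        simp [PySem.Set.ofList, List.foldl_append]
      by_cases hmem : key x ∈ PySem.Set.ofList (m.map key)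
      · have hadd : PySem.Set.add (PySem.Set.ofList (m.map key)) (key x) =
            PySem.Set.ofList (m.map key) := by
          simp only [PySem.Set.add]
          rw [if_pos ((PySem.Set.contains_iff _ _).mpr hmem)]
        have hkeys : pvInsKey (key x)
              (PySem.List.sorted (PySem.Set.ofList (m.map key)) (fun k => k) false) =
            PySem.List.sorted (PySem.Set.ofList ((m ++ [x]).map key)) (fun k => k) false := by
          rw [hofl, hadd]
          exact pv_insKey_of_mem _ _ hK ((PySem.List.mem_sorted _ _ _ _).mpr hmem)
        rw [hkeys]
        refine List.flatMap_congr ?_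
        intro k _
        by_cases hkx : k = key x
        · subst hkx; simp [List.filter_append]
        · simp [List.filter_append, hkx, Ne.symm hkx]
      · have hadd : PySem.Set.add (PySem.Set.ofList (m.map key)) (key x) =
            PySem.Set.ofList (m.map key) ++ [key x] := by
          simp only [PySem.Set.add]
          rw [if_neg (fun h => hmem ((PySem.Set.contains_iff _ _).mp h))]
        have hkeys : pvInsKey (key x)
              (PySem.List.sorted (PySem.Set.ofList (m.map key)) (fun k => k) false) =
            PySem.List.sorted (PySem.Set.ofList ((m ++ [x]).map key)) (fun k => k) false := by
          rw [hofl, hadd, pv_sorted_append_false,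
            pv_insKey_eq_insertBy _ _ (fun h => hmem ((PySem.List.mem_sorted _ _ _ _).mp h))]
        rw [hkeys]
        refine List.flatMap_congr ?_
        intro k _
        by_cases hkx : k = key x
        · subst hkx; simp [List.filter_append]
        · simp [List.filter_append, hkx, Ne.symm hkx]

-- A in normal form: sorted distinct party keys, each party's players sorted by damage descending.
theorem pv_A_eq (pd : List (List (String × Int))) :
    sort_players_in_chunks pd =
      (PySem.List.sorted (PySem.Set.ofList (pd.map (fun p => pvLookup p "party_num")))
          (fun k => k) false).flatMap
        (fun k => PySem.List.sorted (pd.filter (fun p => pvLookup p "party_num" == k))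
          (fun p => pvLookup p "damage_percentage") true) := by
  unfold sort_players_in_chunks
  -- the loop body is Dict.modify
  have hstep : (fun (g : PySem.Dict Int (List (List (String × Int)))) player =>
        let party_num := pvLookup player "party_num"
        let g := if g.contains party_num then g else g.insert party_num []
        g.insert party_num (g.getD party_num [] ++ [player])) =
      (fun g player => PySem.Dict.modify g (pvLookup player "party_num") [] (· ++ [player])) := by
    funext g p
    simp only [PySem.Dict.modify]
    by_cases h : g.contains (pvLookup p "party_num") = true
    · simp [h]
    · simp only [h, Bool.false_eq_true, if_false]
      rw [PySem.Dict.insert_insert_self,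
        PySem.Dict.getD_of_not_contains g [] (by simpa using h)]
      congr 1
      simp [PySem.Dict.getD, PySem.Dict.get?_insert_self]
  rw [hstep]
  -- fold over pairs (key, player)
  have hfold : pd.foldl (fun g player =>
        PySem.Dict.modify g (pvLookup player "party_num") [] (· ++ [player]))
        PySem.Dict.empty =
      (pd.map (fun p => (pvLookup p "party_num", p))).foldl
        (fun g q => PySem.Dict.modify g q.1 [] (· ++ [q.2])) PySem.Dict.empty := by
    rw [List.foldl_map]
  rw [hfold]
  set L := pd.map (fun p => (pvLookup p "party_num", p)) with hL
  have hkeys : ((L.foldl (fun g q => PySem.Dict.modify g q.1 [] (· ++ [q.2]))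
        PySem.Dict.empty).keys :
        List Int) = PySem.Set.ofList (pd.map (fun p => pvLookup p "party_num")) := by
    have := PySem.Dict.keys_foldl_modify_key L (fun q => q.1) ([] : List (List (String × Int)))
      (fun _ q old => old ++ [q.2]) PySem.Dict.empty
    rw [this, PySem.Dict.keys_empty]
    have : L.map (fun q => q.1) = pd.map (fun p => pvLookup p "party_num") := by
      rw [hL, List.map_map]; rfl
    rw [this]; rfl
  have hgetD : ∀ k : Int, (L.foldl (fun g q => PySem.Dict.modify g q.1 [] (· ++ [q.2]))
        PySem.Dict.empty).getD k [] =
      pd.filter (fun p => pvLookup p "party_num" == k) := by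
    intro k
    rw [PySem.Dict.getD_foldl_modify_append L PySem.Dict.empty k]
    have hemp : (PySem.Dict.empty : PySem.Dict Int (List (List (String × Int)))).getD k [] = [] :=
      rfl
    rw [hemp, List.nil_append, hL, List.filter_map, List.map_map]
    have : ((fun q : Int × List (String × Int) => q.1 == k) ∘
        fun p => (pvLookup p "party_num", p)) = fun p => pvLookup p "party_num" == k := rfl
    rw [this]
    have h2 : ((fun x : Int × List (String × Int) => x.2) ∘
        fun p => (pvLookup p "party_num", p)) = id := rfl
    rw [h2, List.map_id]
  show (PySem.List.sorted ((L.foldl (fun g q => PySem.Dict.modify g q.1 [] (· ++ [q.2]))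
        PySem.Dict.empty).keys) (fun k => k) false).foldl
      (fun sorted_players party_num => sorted_players ++
        PySem.List.sorted ((L.foldl (fun g q => PySem.Dict.modify g q.1 [] (· ++ [q.2]))
          PySem.Dict.empty).getD party_num []) (fun p => pvLookup p "damage_percentage") true)
      [] = _
  rw [hkeys, PySem.List.foldl_append_eq_flatMap, List.nil_append]
  exact List.flatMap_congr (fun k _ => by rw [hgetD k])

-- B in the same normal form.
theorem pv_B_eq (pd : List (List (String × Int))) :
    sort_players_in_chunks_alt pd =
      (PySem.List.sorted (PySem.Set.ofList (pd.map (fun p => pvLookup p "party_num")))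
          (fun k => k) false).flatMap
        (fun k => PySem.List.sorted (pd.filter (fun p => pvLookup p "party_num" == k))
          (fun p => pvLookup p "damage_percentage") true) := by
  unfold sort_players_in_chunks_alt
  set w := PySem.List.sorted pd (fun p => pvLookup p "damage_percentage") true with hw
  rw [pv_sorted_eq_flatMap_groups (fun p => pvLookup p "party_num") w]
  have hKeq : PySem.List.sorted (PySem.Set.ofList (w.map (fun p => pvLookup p "party_num")))
        (fun k => k) false =
      PySem.List.sorted (PySem.Set.ofList (pd.map (fun p => pvLookup p "party_num")))
        (fun k => k) false := by
    refine PySem.List.sorted_eq_sorted_of_perm _ _ (fun k => k) (fun a b h => h) ?_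
    refine (List.perm_ext_iff_of_nodup (PySem.Set.nodup_ofList _) (PySem.Set.nodup_ofList _)).mpr ?_
    intro a
    rw [PySem.Set.mem_ofList, PySem.Set.mem_ofList]
    constructor
    · intro h
      rcases List.mem_map.mp h with ⟨p, hp, hpa⟩
      exact List.mem_map.mpr ⟨p, (PySem.List.sorted_perm pd _ true).mem_iff.mp (hw ▸ hp), hpa⟩
    · intro h
      rcases List.mem_map.mp h with ⟨p, hp, hpa⟩
      exact List.mem_map.mpr ⟨p, hw ▸ (PySem.List.sorted_perm pd _ true).mem_iff.mpr hp, hpa⟩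
  rw [hKeq]
  refine List.flatMap_congr ?_
  intro k _
  rw [hw, pv_filter_sorted]

-- ===== VERDICT (by name: the statement is the Claim_ definition above) =====
theorem sort_players_in_chunks_spec : Claim_equal_sort_players_in_chunks := by
  intro pd _ _
  unfold Spec_sort_players_in_chunks
  rw [pv_A_eq, pv_B_eq]
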